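-- pv_equiv track=rewrite | github.com/dashnowlab/inSTRbility | inSTRbility/lib_ssw/pyssw.py | include_substitution
-- ===== SOURCE A (Python) =====
-- def include_substitution(sCigar, target, query, tbegin, qbegin):
--     """
--     Check if the CIGAR string includes substitutions
--     @param  sCigar   CIGAR string
--     @param  target   target sequence
--     @param  query    query sequence
--     """
--
--     new_cigar = ""
--     tpos = tbegin - 1  # convert to 0-based index
--     qpos = qbegin - 1  # convert to 0-based index
--     clen = ''; ctype = ''
--     for c in sCigar:
--         if c.isdigit():
--             clen += c
--         else:
--             ctype = c
--             if ctype == 'M' or ctype == '=':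
--                 mlen = 0; slen = 0
--                 for i in range(int(clen)):
--                     if target[tpos + i] == query[qpos + i]:
--                         if slen > 0: new_cigar += str(slen) + 'X'
--                         mlen += 1
--                         slen = 0
--                     else:
--                         if mlen > 0: new_cigar += str(mlen) + 'M'
--                         mlen = 0
--                         slen += 1
--                 if mlen > 0: new_cigar += str(mlen) + 'M'
--                 if slen > 0: new_cigar += str(slen) + 'X'
--                 tpos += int(clen); qpos += int(clen)
--             elif ctype == 'I':
--                 new_cigar += (str(clen) + 'I'); qpos += int(clen)
--             elif ctype == 'D':
--                 new_cigar += (str(clen) + 'D'); tpos += int(clen)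
--             elif ctype == 'S': new_cigar += (str(clen) + 'S')
--             clen = ''
--     return new_cigar
-- ===== SOURCE B (Python) =====
-- def _runs(ms):
--     # run-length encode a list of booleans, left to right
--     res = []
--     i = 0
--     n = len(ms)
--     while i < n:
--         j = i + 1
--         while j < n and ms[j] == ms[i]:
--             j += 1
--         res.append((ms[i], j - i))
--         i = j
--     return res
--
--
-- def include_substitution(sCigar, target, query, tbegin, qbegin):
--     parts = []
--     tpos = tbegin - 1
--     qpos = qbegin - 1
--     clen = ''
--     for c in sCigar:
--         if c.isdigit():
--             clen += c
--         else:
--             if c == 'M' or c == '=':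
--                 n = int(clen)
--                 matches = [target[tpos + i] == query[qpos + i] for i in range(n)]
--                 for key, cnt in _runs(matches):
--                     parts.append(str(cnt) + ('M' if key else 'X'))
--                 tpos += n
--                 qpos += n
--             elif c == 'I':
--                 parts.append(clen + 'I')
--                 qpos += int(clen)
--             elif c == 'D':
--                 parts.append(clen + 'D')
--                 tpos += int(clen)
--             elif c == 'S':
--                 parts.append(clen + 'S')
--             clen = ''
--     return ''.join(parts)
-- ===== Notes on version B (the rewrite author's own statement) =====
-- stated objective: alternative
-- what changed: The M/= branch's toggle state machine (mlen/slen counters with flush-on-switch and trailing flushes) is replaced by building the match/mismatch boolean sequence once and run-length encoding it with a two-index scan, emitting one piece per run; output is accumulated as a list of pieces joined at the end instead of repeated string concatenation.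
import Mathlib
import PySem

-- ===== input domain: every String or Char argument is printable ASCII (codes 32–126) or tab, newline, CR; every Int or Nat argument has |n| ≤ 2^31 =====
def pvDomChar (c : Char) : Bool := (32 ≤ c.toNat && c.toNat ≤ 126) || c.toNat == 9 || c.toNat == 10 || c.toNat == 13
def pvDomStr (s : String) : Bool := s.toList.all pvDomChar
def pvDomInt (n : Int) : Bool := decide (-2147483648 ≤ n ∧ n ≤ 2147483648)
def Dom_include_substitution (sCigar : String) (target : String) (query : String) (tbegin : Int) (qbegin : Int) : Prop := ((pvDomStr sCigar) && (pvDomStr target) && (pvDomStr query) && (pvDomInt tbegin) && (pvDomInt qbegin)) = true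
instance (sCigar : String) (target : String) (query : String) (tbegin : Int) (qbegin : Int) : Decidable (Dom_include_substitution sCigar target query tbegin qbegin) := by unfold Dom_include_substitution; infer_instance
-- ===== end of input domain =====

-- B replaces A's mlen/slen toggle state machine in the M/= branch by run-length encoding the
-- match/mismatch boolean sequence, and joins a list of pieces at the end (objective: alternative).

-- ===== PORT A =====
def pvStepA (target : String) (query : String) (st : String × Int × Int × String) (c : Char) : String × Int × Int × String :=
  match st with
  | (nc, tp, qp, cl) =>
    if PySem.Chars.isdigit c then (nc, tp, qp, cl.push c)
    else if c = 'M' ∨ c = '=' then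
      let n : Int := (PySem.Int.ofStr? cl).getD 0
      let r := (List.range n.toNat).foldl
        (fun (st2 : String × Int × Int) (i : Nat) =>
          if PySem.Str.pyGet? target (tp + (i : Int)) == PySem.Str.pyGet? query (qp + (i : Int)) then
            ((if st2.2.2 > 0 then st2.1 ++ PySem.Int.toStr st2.2.2 ++ "X" else st2.1), st2.2.1 + 1, 0)
          else
            ((if st2.2.1 > 0 then st2.1 ++ PySem.Int.toStr st2.2.1 ++ "M" else st2.1), 0, st2.2.2 + 1))
        (nc, 0, 0)
      let nc2 := if r.2.1 > 0 then r.1 ++ PySem.Int.toStr r.2.1 ++ "M" else r.1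
      let nc3 := if r.2.2 > 0 then nc2 ++ PySem.Int.toStr r.2.2 ++ "X" else nc2
      (nc3, tp + n, qp + n, "")
    else if c = 'I' then (nc ++ cl ++ "I", tp, qp + (PySem.Int.ofStr? cl).getD 0, "")
    else if c = 'D' then (nc ++ cl ++ "D", tp + (PySem.Int.ofStr? cl).getD 0, qp, "")
    else if c = 'S' then (nc ++ cl ++ "S", tp, qp, "")
    else (nc, tp, qp, "")

def include_substitution (sCigar : String) (target : String) (query : String) (tbegin : Int) (qbegin : Int) : String :=
  (sCigar.toList.foldl (pvStepA target query) ("", tbegin - 1, qbegin - 1, "")).1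

-- ===== PORT B =====
-- run-length encoding of a boolean list, left to right (port of Source B's _runs)
def pvRunsAux (b : Bool) (k : Int) : List Bool → List (Bool × Int)
  | [] => [(b, k)]
  | c :: rest => if c = b then pvRunsAux b (k + 1) rest else (b, k) :: pvRunsAux c 1 rest

def pvRuns : List Bool → List (Bool × Int)
  | [] => []
  | b :: rest => pvRunsAux b 1 rest

def pvPiece (p : Bool × Int) : String := PySem.Int.toStr p.2 ++ (if p.1 then "M" else "X")

def pvStepB (target : String) (query : String) (st : List String × Int × Int × String) (c : Char) : List String × Int × Int × String :=
  match st with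
  | (parts, tp, qp, cl) =>
    if PySem.Chars.isdigit c then (parts, tp, qp, cl.push c)
    else if c = 'M' ∨ c = '=' then
      let n : Int := (PySem.Int.ofStr? cl).getD 0
      let ms := (List.range n.toNat).map
        (fun (i : Nat) => PySem.Str.pyGet? target (tp + (i : Int)) == PySem.Str.pyGet? query (qp + (i : Int)))
      (parts ++ (pvRuns ms).map pvPiece, tp + n, qp + n, "")
    else if c = 'I' then (parts ++ [cl ++ "I"], tp, qp + (PySem.Int.ofStr? cl).getD 0, "")
    else if c = 'D' then (parts ++ [cl ++ "D"], tp + (PySem.Int.ofStr? cl).getD 0, qp, "")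
    else if c = 'S' then (parts ++ [cl ++ "S"], tp, qp, "")
    else (parts, tp, qp, "")

def include_substitution_alt (sCigar : String) (target : String) (query : String) (tbegin : Int) (qbegin : Int) : String :=
  PySem.Str.join "" (sCigar.toList.foldl (pvStepB target query) ([], tbegin - 1, qbegin - 1, "")).1

-- ===== PRECONDITION & SPEC =====
-- tokenizer: the (digits, opchar) tokens of the CIGAR string, in order
def pvTokens : List Char → List Char → List (String × Char)
  | [], _ => []
  | c :: rest, acc => if PySem.Chars.isdigit c then pvTokens rest (acc ++ [c]) else (String.ofList acc, c) :: pvTokens rest []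

-- bounds check over the tokens: every M/=/I/D token has a nonempty count (else int('') is a
-- ValueError) and every position an M/= run reads is a valid Python index (else IndexError)
def pvOk (tlen qlen : Int) : List (String × Char) → Int → Int → Bool
  | [], _, _ => true
  | (cl, c) :: rest, tp, qp =>
    if c = 'M' ∨ c = '=' then
      (cl != "") &&
      (let n := (PySem.Int.ofStr? cl).getD 0
       (decide (n = 0) || (decide (-tlen ≤ tp) && decide (tp + n ≤ tlen) && decide (-qlen ≤ qp) && decide (qp + n ≤ qlen))) &&
       pvOk tlen qlen rest (tp + n) (qp + n))
    else if c = 'I' then (cl != "") && pvOk tlen qlen rest tp (qp + (PySem.Int.ofStr? cl).getD 0)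
    else if c = 'D' then (cl != "") && pvOk tlen qlen rest (tp + (PySem.Int.ofStr? cl).getD 0) qp
    else pvOk tlen qlen rest tp qp

-- Pre_ = exactly the inputs on which A returns: no M/=/I/D operation with an empty count
-- (int('') raises ValueError) and no M/= run reading an index outside Python's valid range
def Pre_include_substitution (sCigar : String) (target : String) (query : String) (tbegin : Int) (qbegin : Int) : Prop :=
  pvOk (PySem.Str.len target) (PySem.Str.len query) (pvTokens sCigar.toList []) (tbegin - 1) (qbegin - 1) = true

instance (sCigar : String) (target : String) (query : String) (tbegin : Int) (qbegin : Int) : Decidable (Pre_include_substitution sCigar target query tbegin qbegin) := by unfold Pre_include_substitution; infer_instance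

def pvWitness_include_substitution : String × String × String × Int × Int := ("2M1I", "AG", "AC", 1, 1)

def Spec_include_substitution (sCigar : String) (target : String) (query : String) (tbegin : Int) (qbegin : Int) (out : String) : Prop := out = include_substitution_alt sCigar target query tbegin qbegin
instance (sCigar : String) (target : String) (query : String) (tbegin : Int) (qbegin : Int) (out : String) : Decidable (Spec_include_substitution sCigar target query tbegin qbegin out) := by unfold Spec_include_substitution; infer_instance

-- ===== CLAIM (what is proved, stated in full; the proofs are below) =====
def Claim_equal_include_substitution : Prop := ∀ (sCigar : String) (target : String) (query : String) (tbegin : Int) (qbegin : Int), Dom_include_substitution sCigar target query tbegin qbegin → Pre_include_substitution sCigar target query tbegin qbegin → Spec_include_substitution sCigar target query tbegin qbegin (include_substitution sCigar target query tbegin qbegin)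

-- ===== LEMMAS AND PROOFS =====

-- A's inner-loop step, abstracted over the comparison result
def pvG (st : String × Int × Int) (b : Bool) : String × Int × Int :=
  if b then ((if st.2.2 > 0 then st.1 ++ PySem.Int.toStr st.2.2 ++ "X" else st.1), st.2.1 + 1, 0)
  else ((if st.2.1 > 0 then st.1 ++ PySem.Int.toStr st.2.1 ++ "M" else st.1), 0, st.2.2 + 1)

-- A's trailing flushes after the inner loop
def pvFlush (st : String × Int × Int) : String :=
  let a := if st.2.1 > 0 then st.1 ++ PySem.Int.toStr st.2.1 ++ "M" else st.1
  if st.2.2 > 0 then a ++ PySem.Int.toStr st.2.2 ++ "X" else a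

lemma pvJoin_nil : PySem.Str.join "" [] = "" := rfl

lemma pvIntercalate_cons (a : List Char) (l : List (List Char)) :
    (List.intersperse ([] : List Char) (a :: l)).flatten = a ++ (List.intersperse ([] : List Char) l).flatten := by
  cases l with
  | nil => simp
  | cons b t => simp [List.intersperse]

lemma pvJoin_cons (x : String) (l : List String) :
    PySem.Str.join "" (x :: l) = x ++ PySem.Str.join "" l := by
  simp only [PySem.Str.join, PySem.Chars.join, List.intercalate, String.toList_empty, List.map_cons]
  rw [pvIntercalate_cons, String.ofList_append, String.ofList_toList]

lemma pvJoin_append (l1 l2 : List String) :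
    PySem.Str.join "" (l1 ++ l2) = PySem.Str.join "" l1 ++ PySem.Str.join "" l2 := by
  induction l1 with
  | nil => simp [pvJoin_nil]
  | cons x t ih => simp [pvJoin_cons, ih, String.append_assoc]

lemma pvAux (L : List Bool) : ∀ (b : Bool) (k : Int), 0 < k → ∀ (nc : String),
    pvFlush (L.foldl pvG (nc, (if b then k else 0), (if b then 0 else k)))
      = nc ++ PySem.Str.join "" ((pvRunsAux b k L).map pvPiece) := by
  induction L with
  | nil =>
    intro b k hk nc
    cases b <;> simp [pvFlush, pvRunsAux, pvPiece, pvJoin_cons, pvJoin_nil, hk, String.append_assoc]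
  | cons c rest ih =>
    intro b k hk nc
    cases b <;> cases c <;> simp only [List.foldl_cons, pvG, pvRunsAux]
    · -- b = false, c = false : mismatch run continues
      have h := ih false (k + 1) (by omega) nc
      simp at h
      simp [h]
    · -- b = false, c = true : close X run, open M run
      have h := ih true 1 (by omega) (nc ++ PySem.Int.toStr k ++ "X")
      simp [String.append_assoc] at h
      simp [hk, h, pvJoin_cons, pvPiece, String.append_assoc]
    · -- b = true, c = false : close M run, open X run
      have h := ih false 1 (by omega) (nc ++ PySem.Int.toStr k ++ "M")
      simp [String.append_assoc] at h
      simp [hk, h, pvJoin_cons, pvPiece, String.append_assoc]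
    · -- b = true, c = true : match run continues
      have h := ih true (k + 1) (by omega) nc
      simp at h
      simp [h]

lemma pvInner (L : List Bool) (nc : String) :
    pvFlush (L.foldl pvG (nc, 0, 0)) = nc ++ PySem.Str.join "" ((pvRuns L).map pvPiece) := by
  cases L with
  | nil => simp [pvFlush, pvRuns, pvJoin_nil]
  | cons c rest =>
    have h := pvAux rest c 1 (by omega) nc
    cases c <;> simpa [pvG, pvRuns] using h

lemma pvStep_rel (t q : String) (parts : List String) (tp qp : Int) (cl : String) (c : Char) :
    pvStepA t q (PySem.Str.join "" parts, tp, qp, cl) c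
      = ((PySem.Str.join "" (pvStepB t q (parts, tp, qp, cl) c).1),
         (pvStepB t q (parts, tp, qp, cl) c).2) := by
  by_cases hd : PySem.Chars.isdigit c
  · simp [pvStepA, pvStepB, hd]
  · by_cases hm : c = 'M' ∨ c = '='
    · have e : ∀ init : String × Int × Int,
        (List.range ((PySem.Int.ofStr? cl).getD 0).toNat).foldl
          (fun (st2 : String × Int × Int) (i : Nat) =>
            if PySem.Str.pyGet? t (tp + (i : Int)) == PySem.Str.pyGet? q (qp + (i : Int)) then
              ((if st2.2.2 > 0 then st2.1 ++ PySem.Int.toStr st2.2.2 ++ "X" else st2.1), st2.2.1 + 1, 0)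
            else ((if st2.2.1 > 0 then st2.1 ++ PySem.Int.toStr st2.2.1 ++ "M" else st2.1), 0, st2.2.2 + 1)) init
        = ((List.range ((PySem.Int.ofStr? cl).getD 0).toNat).map
            (fun (i : Nat) => PySem.Str.pyGet? t (tp + (i : Int)) == PySem.Str.pyGet? q (qp + (i : Int)))).foldl pvG init :=
        fun init => (List.foldl_map
          (f := fun (i : Nat) => PySem.Str.pyGet? t (tp + (i : Int)) == PySem.Str.pyGet? q (qp + (i : Int)))
          (g := pvG) (l := List.range ((PySem.Int.ofStr? cl).getD 0).toNat) (init := init)).symm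
      simp only [pvStepA, pvStepB, hd, hm, if_true, if_false, Bool.false_eq_true]
      rw [e, pvJoin_append, ← pvInner]
      rfl
    · by_cases hI : c = 'I'
      · subst hI
        simp [pvStepA, pvStepB, hd, pvJoin_append, pvJoin_cons, pvJoin_nil, String.append_assoc]
      · by_cases hD : c = 'D'
        · subst hD
          simp [pvStepA, pvStepB, hd, hI, pvJoin_append, pvJoin_cons, pvJoin_nil, String.append_assoc]
        · by_cases hS : c = 'S'
          · subst hS
            simp [pvStepA, pvStepB, hd, hI, hD, pvJoin_append, pvJoin_cons, pvJoin_nil, String.append_assoc]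
          · simp [pvStepA, pvStepB, hd, hm, hI, hD, hS]

lemma pvLoop (t q : String) (cs : List Char) : ∀ (parts : List String) (tp qp : Int) (cl : String),
    cs.foldl (pvStepA t q) (PySem.Str.join "" parts, tp, qp, cl)
      = ((PySem.Str.join "" (cs.foldl (pvStepB t q) (parts, tp, qp, cl)).1),
         (cs.foldl (pvStepB t q) (parts, tp, qp, cl)).2) := by
  induction cs with
  | nil => intro parts tp qp cl; rfl
  | cons c rest ih =>
    intro parts tp qp cl
    simp only [List.foldl_cons]
    rw [pvStep_rel]
    obtain ⟨p', tp', qp', cl'⟩ := pvStepB t q (parts, tp, qp, cl) c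
    exact ih p' tp' qp' cl'

-- ===== VERDICT (by name: the statement is the Claim_ definition above) =====
theorem include_substitution_spec : Claim_equal_include_substitution := by
  intro sCigar target query tbegin qbegin _ _
  unfold Spec_include_substitution include_substitution include_substitution_alt
  have h := pvLoop target query sCigar.toList [] (tbegin - 1) (qbegin - 1) ""
  rw [pvJoin_nil] at h
  rw [h]
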